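-- pv_equiv track=rewrite | github.com/sujinpark6774/Coding_Practice_Python_Lecture01 | 5_Graph/graph_Q3.py | canVisitAllRoomsBFS
-- ===== SOURCE A (Python) =====
-- from collections import deque
--
-- def canVisitAllRoomsBFS(rooms):
--     visited = [False] * len(rooms)
--
--     def bfs(v):
--         queue = deque()
--         queue.append(v)
--         visited[v] = True
--         while queue:
--             cur_v = queue.popleft()
--             for next_v in rooms[cur_v]:
--                 if visited[next_v] == False:
--                     queue.append(next_v)
--                     visited[next_v] = True
--
--     bfs(0)
--
--     return all(visited)
-- ===== SOURCE B (Python) =====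
-- def canVisitAllRoomsBFS(rooms):
--     # Iterative depth-first search: LIFO stack, mark-on-pop, push all
--     # neighbours unconditionally (no inner visited guard, no deque).
--     visited = [False] * len(rooms)
--     stack = [0]
--     while stack:
--         v = stack.pop()
--         if not visited[v]:
--             visited[v] = True
--             stack.extend(rooms[v])
--     return all(visited)
-- ===== Notes on version B (the rewrite author's own statement) =====
-- stated objective: alternative
-- what changed: Replaces the FIFO deque BFS with mark-at-enqueue and an inner not-visited guard by an iterative DFS over a plain list stack with mark-at-pop and an unconditional extend of the neighbour list; the traversal order differs but the visited set is the same reachable set.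
-- outside the precondition, e.g. on canVisitAllRoomsBFS([[], [5]]): A returns False, B returns False
import Mathlib
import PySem

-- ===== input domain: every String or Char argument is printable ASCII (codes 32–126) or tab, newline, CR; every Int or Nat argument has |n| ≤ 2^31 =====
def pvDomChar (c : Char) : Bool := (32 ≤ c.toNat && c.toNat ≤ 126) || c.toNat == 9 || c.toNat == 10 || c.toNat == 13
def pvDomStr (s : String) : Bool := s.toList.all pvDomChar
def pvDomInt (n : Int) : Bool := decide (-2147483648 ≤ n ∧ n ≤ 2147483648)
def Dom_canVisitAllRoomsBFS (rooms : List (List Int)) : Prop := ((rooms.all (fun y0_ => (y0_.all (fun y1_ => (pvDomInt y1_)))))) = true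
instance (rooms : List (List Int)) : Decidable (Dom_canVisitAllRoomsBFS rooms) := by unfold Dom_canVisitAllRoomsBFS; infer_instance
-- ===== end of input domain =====

-- B replaces A's FIFO-queue BFS (mark at enqueue, inner not-visited guard) by an iterative

-- DFS over a plain stack (mark at pop, unconditional push of the whole neighbour list);

-- same reachable set, hence the same return value on all inputs admitted by Pre_.

-- ===== PORT A =====
-- helper lemmas the ports' termination proofs cite by name
theorem pvIdx_lt {n : Nat} {i : Int} {j : Nat} (h : PySem.List.pyIdx? n i = some j) : j < n := by
  unfold PySem.List.pyIdx? at h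
  split_ifs at h with h1 h2 h3 <;> simp_all <;> omega

theorem pvCount_set {l : List Bool} {j : Nat} (hj : j < l.length)
    (hf : l.getD j false = false) : (l.set j true).count false + 1 = l.count false := by
  have hg : l[j] = false := by rw [← List.getD_eq_getElem l false hj]; exact hf
  have hc := List.count_set (a := true) (b := false) (l := l) (i := j) hj
  have hpos : 0 < l.count false := by
    have : l[j] ∈ l := List.getElem_mem hj
    have := List.count_pos_iff.2 (by rw [hg] at this; exact this)
    omega
  simp [hg] at hc
  omega

-- one neighbour of A's inner 'for next_v in rooms[cur_v]' loop; state = (visited, newly appended queue entries)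
def pvBfsStep (st : List Bool × List Int) (nxt : Int) : List Bool × List Int :=
  match PySem.List.pyIdx? st.1.length nxt with
  | none => st          -- Python: 'visited[next_v]' raises IndexError here; outside Pre_
  | some j => if st.1.getD j false then st else (st.1.set j true, st.2 ++ [nxt])

theorem pvBfsStep_measure (st : List Bool × List Int) (nxt : Int) :
    (pvBfsStep st nxt).1.count false + (pvBfsStep st nxt).2.length
      = st.1.count false + st.2.length := by
  unfold pvBfsStep
  cases h : PySem.List.pyIdx? st.1.length nxt with
  | none => simp
  | some j =>
    dsimp only
    by_cases hv : st.1.getD j false = true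
    · rw [if_pos hv]
    · rw [if_neg hv]
      have := pvCount_set (pvIdx_lt h) (by simpa using hv)
      simp only [List.length_append, List.length_cons, List.length_nil]
      omega

theorem pvBfsFold_measure (l : List Int) (st : List Bool × List Int) :
    (l.foldl pvBfsStep st).1.count false + (l.foldl pvBfsStep st).2.length
      = st.1.count false + st.2.length := by
  induction l generalizing st with
  | nil => simp
  | cons x xs ih => rw [List.foldl_cons, ih, pvBfsStep_measure]

-- A's 'while queue:' loop
def pvBfsLoop (rooms : List (List Int)) (visited : List Bool) (queue : List Int) : List Bool :=
  match queue with
  | [] => visited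
  | cur :: rest =>
    let st := ((PySem.List.pyGet? rooms cur).getD []).foldl pvBfsStep (visited, [])
    pvBfsLoop rooms st.1 (rest ++ st.2)
termination_by visited.count false + queue.length
decreasing_by
  have := pvBfsFold_measure ((PySem.List.pyGet? rooms cur).getD []) (visited, [])
  simp at this ⊢
  omega

def canVisitAllRoomsBFS (rooms : List (List Int)) : Bool :=
  let visited := List.replicate rooms.length false
  match PySem.List.pySet? visited 0 true with
  | none => false       -- Python: 'visited[0] = True' raises IndexError (rooms = []); outside Pre_
  | some visited1 => (pvBfsLoop rooms visited1 [0]).all (fun b => b)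

-- ===== PORT B =====
-- B's 'while stack:' loop; head of the Lean list is the top of the Python stack,
-- so 'stack.extend(rooms[v])' becomes consing the reversed neighbour list
def pvDfsLoop (rooms : List (List Int)) (visited : List Bool) (stack : List Int) : List Bool :=
  match stack with
  | [] => visited
  | v :: rest =>
    match h : PySem.List.pyIdx? visited.length v with
    | none => pvDfsLoop rooms visited rest   -- Python: 'visited[v]' raises IndexError here; outside Pre_
    | some j =>
      if visited.getD j false then pvDfsLoop rooms visited rest
      else pvDfsLoop rooms (visited.set j true)
        (((PySem.List.pyGet? rooms v).getD []).reverse ++ rest)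
termination_by (visited.count false, stack.length)
decreasing_by
  · apply Prod.Lex.right; simp
  · apply Prod.Lex.right; simp
  · apply Prod.Lex.left
    have := pvCount_set (pvIdx_lt h) (by simp_all)
    omega

def canVisitAllRoomsBFS_alt (rooms : List (List Int)) : Bool :=
  (pvDfsLoop rooms (List.replicate rooms.length false) [0]).all (fun b => b)

-- ===== PRECONDITION & SPEC =====
-- Pre_ excludes empty rooms and inputs with an out-of-range neighbour index, on which A
-- raises IndexError when that index is reached; unreached bad indices are over-excluded
-- (A and B both return False there, see the cite in claim.json).
def Pre_canVisitAllRoomsBFS (rooms : List (List Int)) : Prop :=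
  rooms ≠ [] ∧ ∀ l ∈ rooms, ∀ i ∈ l, PySem.Raise.InRange rooms.length i
instance (rooms : List (List Int)) : Decidable (Pre_canVisitAllRoomsBFS rooms) := by
  unfold Pre_canVisitAllRoomsBFS PySem.Raise.InRange; infer_instance
def pvWitness_canVisitAllRoomsBFS : List (List Int) := [[1], [0]]

def Spec_canVisitAllRoomsBFS (rooms : List (List Int)) (out : Bool) : Prop := out = canVisitAllRoomsBFS_alt rooms
instance (rooms : List (List Int)) (out : Bool) : Decidable (Spec_canVisitAllRoomsBFS rooms out) := by unfold Spec_canVisitAllRoomsBFS; infer_instance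

-- ===== CLAIM (what is proved, stated in full; the proofs are below) =====
def Claim_equal_canVisitAllRoomsBFS : Prop := ∀ (rooms : List (List Int)), Dom_canVisitAllRoomsBFS rooms → Pre_canVisitAllRoomsBFS rooms → Spec_canVisitAllRoomsBFS rooms (canVisitAllRoomsBFS rooms)

-- ===== LEMMAS AND PROOFS =====

-- the graph on normalised (Nat) room indices, and reachability from room 0
def pvEdge (rooms : List (List Int)) (j k : Nat) : Prop :=
  ∃ i ∈ rooms.getD j [], PySem.List.pyIdx? rooms.length i = some k

inductive pvReach (rooms : List (List Int)) : Nat → Prop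
  | zero : pvReach rooms 0
  | step {j k : Nat} : pvReach rooms j → pvEdge rooms j k → pvReach rooms k

theorem pvGetD_set_true {l : List Bool} {j k : Nat} (hj : j < l.length) :
    (l.set j true).getD k false = if k = j then true else l.getD k false := by
  by_cases hk : k < l.length
  · rw [List.getD_eq_getElem _ _ (by simpa using hk), List.getD_eq_getElem _ _ hk,
      List.getElem_set]
    simp [eq_comm]
  · have h1 : (l.set j true).getD k false = false := by
      apply List.getD_eq_default; simpa using Nat.le_of_not_lt hk
    have h2 : l.getD k false = false := List.getD_eq_default _ _ (Nat.le_of_not_lt hk)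
    rw [h1, h2]
    simp; omega

theorem pvGet_rooms {rooms : List (List Int)} {v : Int} {j : Nat}
    (h : PySem.List.pyIdx? rooms.length v = some j) :
    (PySem.List.pyGet? rooms v).getD [] = rooms.getD j [] := by
  have hj := pvIdx_lt h
  simp [PySem.List.pyGet?, h, List.getElem?_eq_getElem hj]

theorem pvGet_rooms_none {rooms : List (List Int)} {v : Int}
    (h : PySem.List.pyIdx? rooms.length v = none) :
    (PySem.List.pyGet? rooms v).getD [] = [] := by
  simp [PySem.List.pyGet?, h]

theorem pvBfsStep_cases (st : List Bool × List Int) (x : Int) :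
    (PySem.List.pyIdx? st.1.length x = none ∧ pvBfsStep st x = st) ∨
    (∃ j, PySem.List.pyIdx? st.1.length x = some j ∧ st.1.getD j false = true ∧ pvBfsStep st x = st) ∨
    (∃ j, PySem.List.pyIdx? st.1.length x = some j ∧ st.1.getD j false = false ∧
        pvBfsStep st x = (st.1.set j true, st.2 ++ [x])) := by
  unfold pvBfsStep
  cases h : PySem.List.pyIdx? st.1.length x with
  | none => exact Or.inl ⟨rfl, rfl⟩
  | some j =>
    dsimp only
    by_cases hv : st.1.getD j false = true
    · exact Or.inr (Or.inl ⟨j, rfl, hv, by rw [if_pos hv]⟩)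
    · exact Or.inr (Or.inr ⟨j, rfl, by simpa using hv, by rw [if_neg hv]⟩)

-- everything the BFS inner fold guarantees, in one induction
theorem pvBfsFold_spec (n : Nat) (l : List Int) :
    ∀ st : List Bool × List Int, st.1.length = n →
    (l.foldl pvBfsStep st).1.length = n ∧
    (∀ k, st.1.getD k false = true → (l.foldl pvBfsStep st).1.getD k false = true) ∧
    (∀ i ∈ l, ∀ k, PySem.List.pyIdx? n i = some k → (l.foldl pvBfsStep st).1.getD k false = true) ∧
    (∀ i ∈ (l.foldl pvBfsStep st).2, i ∈ st.2 ∨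
       (i ∈ l ∧ ∀ k, PySem.List.pyIdx? n i = some k → (l.foldl pvBfsStep st).1.getD k false = true)) ∧
    (∀ k, (l.foldl pvBfsStep st).1.getD k false = true → st.1.getD k false = true ∨
       ∃ i, i ∈ l ∧ i ∈ (l.foldl pvBfsStep st).2 ∧ PySem.List.pyIdx? n i = some k) ∧
    (∀ i ∈ st.2, i ∈ (l.foldl pvBfsStep st).2) := by
  induction l with
  | nil =>
    intro st hlen
    refine ⟨hlen, fun k hk => hk, ?_, ?_, ?_, fun i hi => hi⟩
    · intro i hi; exact absurd hi (List.not_mem_nil)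
    · intro i hi; exact Or.inl hi
    · intro k hk; exact Or.inl hk
  | cons x xs ih =>
    intro st hlen
    rw [List.foldl_cons]
    -- facts about the single step
    rcases pvBfsStep_cases st x with ⟨hnone, heq⟩ | ⟨j, hx, hv, heq⟩ | ⟨j, hx, hv, heq⟩
    -- IndexError-skip or already-visited step: state unchanged
    case inl | inr.inl =>
      rw [heq]
      obtain ⟨c1, c2, c3, c4, c5, c6⟩ := ih st hlen
      refine ⟨c1, c2, ?_, ?_, ?_, c6⟩
      · intro i hi k hk
        rcases List.mem_cons.1 hi with rfl | hi'
        · -- i = x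
          first
          | (rw [hlen] at hnone; rw [hnone] at hk; exact absurd hk (by simp))
          | (rw [hlen] at hx; rw [hx] at hk; obtain rfl := Option.some.inj hk; exact c2 _ hv)
        · exact c3 i hi' k hk
      · intro i hi
        rcases c4 i hi with h1 | ⟨h1, h2⟩
        · exact Or.inl h1
        · exact Or.inr ⟨List.mem_cons_of_mem _ h1, h2⟩
      · intro k hk
        rcases c5 k hk with h1 | ⟨i, h1, h2, h3⟩
        · exact Or.inl h1
        · exact Or.inr ⟨i, List.mem_cons_of_mem _ h1, h2, h3⟩
    -- marking step
    case inr.inr =>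
      rw [heq]
      have hjlt : j < st.1.length := pvIdx_lt hx
      have hlen' : (st.1.set j true).length = n := by simpa using hlen
      obtain ⟨c1, c2, c3, c4, c5, c6⟩ := ih ((st.1.set j true, st.2 ++ [x])) hlen'
      have hmark : ((st.1.set j true : List Bool)).getD j false = true := by
        rw [pvGetD_set_true hjlt]; simp
      have hmono : ∀ k, st.1.getD k false = true → ((st.1.set j true : List Bool)).getD k false = true := by
        intro k hk
        rw [pvGetD_set_true hjlt]
        by_cases h : k = j
        · rw [if_pos h]
        · rw [if_neg h]; exact hk
      have hxin : x ∈ (xs.foldl pvBfsStep (st.1.set j true, st.2 ++ [x])).2 :=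
        c6 x (by simp)
      refine ⟨c1, ?_, ?_, ?_, ?_, ?_⟩
      · intro k hk; exact c2 k (hmono k hk)
      · intro i hi k hk
        rcases List.mem_cons.1 hi with rfl | hi'
        · rw [hlen] at hx; rw [hx] at hk; obtain rfl := Option.some.inj hk
          exact c2 _ hmark
        · exact c3 i hi' k hk
      · intro i hi
        rcases c4 i hi with h1 | ⟨h1, h2⟩
        · rcases List.mem_append.1 h1 with h1' | h1'
          · exact Or.inl h1'
          · obtain rfl : i = x := by simpa using h1'
            refine Or.inr ⟨by simp, ?_⟩
            intro k hk
            rw [hlen] at hx; rw [hx] at hk; obtain rfl := Option.some.inj hk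
            exact c2 _ hmark
        · exact Or.inr ⟨List.mem_cons_of_mem _ h1, h2⟩
      · intro k hk
        rcases c5 k hk with h1 | ⟨i, h1, h2, h3⟩
        · rw [pvGetD_set_true hjlt] at h1
          by_cases hkj : k = j
          · subst hkj
            refine Or.inr ⟨x, by simp, hxin, by rw [hlen] at hx; exact hx⟩
          · rw [if_neg hkj] at h1; exact Or.inl h1
        · exact Or.inr ⟨i, List.mem_cons_of_mem _ h1, h2, h3⟩
      · intro i hi
        exact c6 i (by simp [hi])

-- the BFS loop computes exactly the reachable set
theorem pvBfsLoop_spec (rooms : List (List Int)) (visited : List Bool) (queue : List Int)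
    (hlen : visited.length = rooms.length)
    (h0 : visited.getD 0 false = true)
    (hq : ∀ i ∈ queue, ∀ k, PySem.List.pyIdx? rooms.length i = some k → visited.getD k false = true)
    (hsound : ∀ k, visited.getD k false = true → pvReach rooms k)
    (hclosed : ∀ j k, visited.getD j false = true → pvEdge rooms j k →
        visited.getD k false = true ∨ ∃ i ∈ queue, PySem.List.pyIdx? rooms.length i = some j) :
    (pvBfsLoop rooms visited queue).length = rooms.length ∧
    (∀ k, (pvBfsLoop rooms visited queue).getD k false = true ↔ pvReach rooms k) := by
  revert hlen h0 hq hsound hclosed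
  induction visited, queue using pvBfsLoop.induct (rooms := rooms) with
  | case1 visited =>
    intro hlen h0 hq hsound hclosed
    rw [pvBfsLoop]
    refine ⟨hlen, fun k => ⟨hsound k, ?_⟩⟩
    intro hr
    induction hr with
    | zero => exact h0
    | step hj he ihj =>
      rcases hclosed _ _ ihj he with h | ⟨i, hi, _⟩
      · exact h
      · exact absurd hi (List.not_mem_nil)
  | case2 visited cur rest st ih =>
    intro hlen h0 hq hsound hclosed
    rw [pvBfsLoop]
    obtain ⟨c1, c2, c3, c4, c5, c6⟩ :=
      pvBfsFold_spec rooms.length ((PySem.List.pyGet? rooms cur).getD []) (visited, []) hlen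
    apply ih c1 (c2 0 h0)
    · -- queue entries of the next state are visited
      intro i hi k hk
      rcases List.mem_append.1 hi with hi' | hi'
      · exact c2 k (hq i (List.mem_cons_of_mem _ hi') k hk)
      · rcases c4 i hi' with h1 | ⟨_, h2⟩
        · exact absurd h1 (List.not_mem_nil)
        · exact h2 k hk
    · -- soundness
      intro k hk
      rcases c5 k hk with h1 | ⟨i, hi, _, hnorm⟩
      · exact hsound k h1
      · cases hcur : PySem.List.pyIdx? rooms.length cur with
        | none => rw [pvGet_rooms_none hcur] at hi; exact absurd hi (List.not_mem_nil)
        | some j0 =>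
          have hreach : pvReach rooms j0 :=
            hsound j0 (hq cur (List.mem_cons_self) j0 hcur)
          rw [pvGet_rooms hcur] at hi
          exact pvReach.step hreach ⟨i, hi, hnorm⟩
    · -- closure invariant
      intro j k hj he
      rcases c5 j hj with h1 | ⟨i, hi, hiF, hnorm⟩
      · rcases hclosed j k h1 he with h2 | ⟨i, hi, hnorm⟩
        · exact Or.inl (c2 k h2)
        · rcases List.mem_cons.1 hi with rfl | hi'
          · obtain ⟨i', hi', hnorm'⟩ := he
            rw [← pvGet_rooms hnorm] at hi'
            exact Or.inl (c3 i' hi' k hnorm')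
          · exact Or.inr ⟨i, List.mem_append.2 (Or.inl hi'), hnorm⟩
      · exact Or.inr ⟨i, List.mem_append.2 (Or.inr hiF), hnorm⟩

-- the DFS loop computes exactly the reachable set
theorem pvDfsLoop_spec (rooms : List (List Int)) (visited : List Bool) (stack : List Int)
    (hlen : visited.length = rooms.length)
    (hst : ∀ i ∈ stack, ∀ k, PySem.List.pyIdx? rooms.length i = some k → pvReach rooms k)
    (hsound : ∀ k, visited.getD k false = true → pvReach rooms k)
    (hclosed : ∀ j k, visited.getD j false = true → pvEdge rooms j k →
        visited.getD k false = true ∨ ∃ i ∈ stack, PySem.List.pyIdx? rooms.length i = some k)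
    (h0 : visited.getD 0 false = true ∨ ∃ i ∈ stack, PySem.List.pyIdx? rooms.length i = some 0) :
    (pvDfsLoop rooms visited stack).length = rooms.length ∧
    (∀ k, (pvDfsLoop rooms visited stack).getD k false = true ↔ pvReach rooms k) := by
  revert hlen hst hsound hclosed h0
  induction visited, stack using pvDfsLoop.induct (rooms := rooms) with
  | case1 visited =>
    intro hlen hst hsound hclosed h0
    rw [pvDfsLoop]
    have h0' : visited.getD 0 false = true := by
      rcases h0 with h | ⟨i, hi, _⟩
      · exact h
      · exact absurd hi (List.not_mem_nil)
    refine ⟨hlen, fun k => ⟨hsound k, ?_⟩⟩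
    intro hr
    induction hr with
    | zero => exact h0'
    | step hj he ihj =>
      rcases hclosed _ _ ihj he with h | ⟨i, hi, _⟩
      · exact h
      · exact absurd hi (List.not_mem_nil)
  | case2 visited cur rest hnone ih =>
    intro hlen hst hsound hclosed h0
    rw [pvDfsLoop]
    rw [hnone]
    dsimp only
    apply ih hlen
    · intro i hi; exact hst i (List.mem_cons_of_mem _ hi)
    · exact hsound
    · intro j k hj he
      rcases hclosed j k hj he with h | ⟨i, hi, hnorm⟩
      · exact Or.inl h
      · rcases List.mem_cons.1 hi with rfl | hi'
        · rw [hlen] at hnone; rw [hnone] at hnorm; exact absurd hnorm (by simp)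
        · exact Or.inr ⟨i, hi', hnorm⟩
    · rcases h0 with h | ⟨i, hi, hnorm⟩
      · exact Or.inl h
      · rcases List.mem_cons.1 hi with rfl | hi'
        · rw [hlen] at hnone; rw [hnone] at hnorm; exact absurd hnorm (by simp)
        · exact Or.inr ⟨i, hi', hnorm⟩
  | case3 visited cur rest j hcur hv ih =>
    intro hlen hst hsound hclosed h0
    rw [pvDfsLoop]
    rw [hcur]
    dsimp only
    rw [if_pos hv]
    apply ih hlen
    · intro i hi; exact hst i (List.mem_cons_of_mem _ hi)
    · exact hsound
    · intro j' k hj' he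
      rcases hclosed j' k hj' he with h | ⟨i, hi, hnorm⟩
      · exact Or.inl h
      · rcases List.mem_cons.1 hi with rfl | hi'
        · rw [hlen] at hcur; rw [hcur] at hnorm
          obtain rfl := Option.some.inj hnorm
          exact Or.inl hv
        · exact Or.inr ⟨i, hi', hnorm⟩
    · rcases h0 with h | ⟨i, hi, hnorm⟩
      · exact Or.inl h
      · rcases List.mem_cons.1 hi with rfl | hi'
        · rw [hlen] at hcur; rw [hcur] at hnorm
          obtain rfl := Option.some.inj hnorm
          exact Or.inl hv
        · exact Or.inr ⟨i, hi', hnorm⟩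
  | case4 visited cur rest j hcur hv ih =>
    intro hlen hst hsound hclosed h0
    rw [pvDfsLoop]
    rw [hcur]
    dsimp only
    rw [if_neg hv]
    have hjlt : j < visited.length := pvIdx_lt hcur
    have hcur' : PySem.List.pyIdx? rooms.length cur = some j := by rw [← hlen]; exact hcur
    have hreach : pvReach rooms j := hst cur (List.mem_cons_self) j hcur'
    have hnbrs := pvGet_rooms hcur'
    have hmark : ((visited.set j true : List Bool)).getD j false = true := by
      rw [pvGetD_set_true hjlt]; simp
    have hmono : ∀ k, visited.getD k false = true → ((visited.set j true : List Bool)).getD k false = true := by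
      intro k hk
      rw [pvGetD_set_true hjlt]
      by_cases h : k = j
      · rw [if_pos h]
      · rw [if_neg h]; exact hk
    apply ih (by simpa using hlen)
    · -- stack entries lead to reachable rooms
      intro i hi k hk
      rcases List.mem_append.1 hi with hi' | hi'
      · rw [List.mem_reverse, hnbrs] at hi'
        exact pvReach.step hreach ⟨i, hi', hk⟩
      · exact hst i (List.mem_cons_of_mem _ hi') k hk
    · -- soundness
      intro k hk
      rw [pvGetD_set_true hjlt] at hk
      by_cases h : k = j
      · subst h; exact hreach
      · rw [if_neg h] at hk; exact hsound k hk
    · -- closure invariant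
      intro j' k hj' he
      rw [pvGetD_set_true hjlt] at hj'
      by_cases h : j' = j
      · subst h
        obtain ⟨i', hi', hnorm'⟩ := he
        rw [← hnbrs] at hi'
        exact Or.inr ⟨i', List.mem_append.2 (Or.inl (List.mem_reverse.2 hi')), hnorm'⟩
      · rw [if_neg h] at hj'
        rcases hclosed j' k hj' he with h1 | ⟨i, hi, hnorm⟩
        · exact Or.inl (hmono k h1)
        · rcases List.mem_cons.1 hi with rfl | hi'
          · rw [hcur'] at hnorm
            obtain rfl := Option.some.inj hnorm
            exact Or.inl hmark
          · exact Or.inr ⟨i, List.mem_append.2 (Or.inr hi'), hnorm⟩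
    · rcases h0 with h | ⟨i, hi, hnorm⟩
      · exact Or.inl (hmono 0 h)
      · rcases List.mem_cons.1 hi with rfl | hi'
        · rw [hcur'] at hnorm
          obtain rfl := Option.some.inj hnorm
          exact Or.inl hmark
        · exact Or.inr ⟨i, List.mem_append.2 (Or.inr hi'), hnorm⟩

-- ===== VERDICT (by name: the statement is the Claim_ definition above) =====
theorem canVisitAllRoomsBFS_spec : Claim_equal_canVisitAllRoomsBFS := by
  intro rooms _ hpre
  unfold Spec_canVisitAllRoomsBFS
  obtain ⟨hne, -⟩ := hpre
  have hn : 0 < rooms.length := List.length_pos_iff.mpr hne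
  have hidx0 : PySem.List.pyIdx? rooms.length 0 = some 0 := by
    unfold PySem.List.pyIdx?
    simp
    omega
  set vis0 := List.replicate rooms.length false with hvis0
  have hlen0 : vis0.length = rooms.length := by simp [hvis0]
  have hset : PySem.List.pySet? vis0 0 true = some (vis0.set 0 true) := by
    simp [PySem.List.pySet?, hlen0, hidx0]
  have hrep : ∀ k, vis0.getD k false = false := by
    intro k
    by_cases hk : k < rooms.length
    · rw [hvis0]; exact List.getD_replicate _ hk
    · exact List.getD_eq_default _ _ (by rw [hlen0]; omega)
  have h0lt : (0 : Nat) < vis0.length := by rw [hlen0]; exact hn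
  have hget1 : ∀ k, ((vis0.set 0 true : List Bool)).getD k false = true ↔ k = 0 := by
    intro k
    rw [pvGetD_set_true h0lt]
    by_cases h : k = 0
    · rw [if_pos h]; simp [h]
    · rw [if_neg h, hrep k]; simp [h]
  obtain ⟨lA, iA⟩ := pvBfsLoop_spec rooms (vis0.set 0 true) [0]
    (by simpa using hlen0)
    ((hget1 0).2 rfl)
    (by intro i hi k hk
        obtain rfl := List.mem_singleton.1 hi
        rw [hidx0] at hk
        obtain rfl := Option.some.inj hk
        exact (hget1 0).2 rfl)
    (by intro k hk
        rw [hget1] at hk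
        subst hk
        exact pvReach.zero)
    (by intro j k hj he
        rw [hget1] at hj
        subst hj
        exact Or.inr ⟨0, List.mem_singleton.2 rfl, hidx0⟩)
  obtain ⟨lB, iB⟩ := pvDfsLoop_spec rooms vis0 [0]
    hlen0
    (by intro i hi k hk
        obtain rfl := List.mem_singleton.1 hi
        rw [hidx0] at hk
        obtain rfl := Option.some.inj hk
        exact pvReach.zero)
    (by intro k hk
        rw [hrep k] at hk
        exact absurd hk (by simp))
    (by intro j k hj he
        rw [hrep j] at hj
        exact absurd hj (by simp))
    (Or.inr ⟨0, List.mem_singleton.2 rfl, hidx0⟩)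
  have heq : pvBfsLoop rooms (vis0.set 0 true) [0] = pvDfsLoop rooms vis0 [0] := by
    apply List.ext_getElem (by rw [lA, lB])
    intro i h1 h2
    have hA := iA i
    have hB := iB i
    rw [List.getD_eq_getElem _ false h1] at hA
    rw [List.getD_eq_getElem _ false h2] at hB
    have hiff := hA.trans hB.symm
    cases hx : (pvBfsLoop rooms (vis0.set 0 true) [0])[i] <;>
      cases hy : (pvDfsLoop rooms vis0 [0])[i] <;> simp_all
  unfold canVisitAllRoomsBFS canVisitAllRoomsBFS_alt
  rw [← hvis0]
  dsimp only
  rw [hset]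
  dsimp only
  rw [heq]
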